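-- pv_equiv track=rewrite | github.com/MrBanh/Python-Programming-and-Data-Structures | Chapter 16/ConsecutiveIncreasingString.py | consecutive_substring1
-- ===== SOURCE A (Python) =====
-- def consecutive_substring1(s):
--     # Time Complexicity: O(n)
--     current_substring_length = 1
--     max_length = 1
--     last_index_max_substring = 0
--
--     # Loop through each letter of s, O(n)
--     for i in range(1, len(s)):
--         # Compare to previous letter
--         # If current letter > previous letter
--         if s[i] > s[i - 1]:
--             current_substring_length += 1
--         # current letter < previous letter, substring is broken
--         else:
--             # Compare current substring to max substring
--             if current_substring_length > max_length:
--                 max_length = current_substring_length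
--                 last_index_max_substring = i
--
--             # Resets the length of the current string
--             current_substring_length = 1
--
--     # Check the case where max substring might be at end of s
--     if current_substring_length > max_length:
--         max_length = current_substring_length
--         last_index_max_substring = len(s)
--
--     return s[last_index_max_substring - max_length:last_index_max_substring]
-- ===== SOURCE B (Python) =====
-- def consecutive_substring1(s):
--     # Two-pass: run-length table, then argmax (earliest longest run wins).
--     L = []
--     prev_len = 0
--     prev_ch = None
--     for ch in s:
--         prev_len = prev_len + 1 if prev_ch is not None and ch > prev_ch else 1
--         L.append(prev_len)
--         prev_ch = ch
--     max_length = 1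
--     last_index = 0
--     for i, l in enumerate(L):
--         if l > max_length:
--             max_length = l
--             last_index = i + 1
--     return s[last_index - max_length:last_index]
-- ===== Notes on version B (the rewrite author's own statement) =====
-- stated objective: alternative
-- what changed: Replaces A's fused loop (run counter updated and maximum recorded only at run breaks plus a post-loop end check) by two separate passes: first build the run-length table L[i] = length of the increasing run ending at i, then a plain argmax over L with strict comparison so the earliest longest run wins; the default (1,0) state yields the empty result with no special case.
import Mathlib
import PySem

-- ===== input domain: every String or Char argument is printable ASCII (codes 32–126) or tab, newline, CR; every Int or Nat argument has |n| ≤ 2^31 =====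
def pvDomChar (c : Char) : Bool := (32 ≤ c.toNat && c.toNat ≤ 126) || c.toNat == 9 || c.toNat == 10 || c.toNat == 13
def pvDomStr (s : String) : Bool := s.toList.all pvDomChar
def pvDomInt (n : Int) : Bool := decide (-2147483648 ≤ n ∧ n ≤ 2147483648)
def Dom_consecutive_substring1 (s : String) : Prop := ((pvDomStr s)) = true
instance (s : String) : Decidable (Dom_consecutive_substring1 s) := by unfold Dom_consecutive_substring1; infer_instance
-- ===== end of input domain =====

-- B replaces A's fused single loop by two separate passes (run-length table, then argmax); same O(n) cost, different decomposition.

-- ===== PORT A =====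
-- A's loop body: state (current_substring_length, max_length, last_index_max_substring), index i
def pvStepA (cs : List Char) (st : Int × Int × Int) (i : Int) : Int × Int × Int :=
  match st with
  | (cur, maxl, idx) =>
    if PySem.List.pyGetD cs (i - 1) ' ' < PySem.List.pyGetD cs i ' ' then
      (cur + 1, maxl, idx)
    else
      if cur > maxl then (1, cur, i) else (1, maxl, idx)

def consecutive_substring1 (s : String) : String :=
  match (PySem.List.pyRange 1 (PySem.Str.len s) 1).foldl (pvStepA s.toList) (1, 1, 0) with
  | (cur, maxl, idx) =>
    match (if cur > maxl then (cur, PySem.Str.len s) else (maxl, idx)) with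
    | (maxl, idx) => PySem.Str.slice s (some (idx - maxl)) (some idx)

-- ===== PORT B =====
-- first pass: run-length table, L[i] = length of the increasing run ending at i
def pvBuildL (prev : Option Char) (plen : Int) : List Char → List Int
  | [] => []
  | c :: rest =>
      let l := match prev with | some p => if p < c then plen + 1 else 1 | none => 1
      l :: pvBuildL (some c) l rest

-- second pass: argmax with strict '>', so the earliest maximum wins
def pvStepB (st : Int × Int) (p : Int × Int) : Int × Int :=
  if p.2 > st.1 then (p.2, p.1 + 1) else st

def consecutive_substring1_alt (s : String) : String :=
  match (PySem.List.enumerate (pvBuildL none 0 s.toList) 0).foldl pvStepB (1, 0) with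
  | (maxl, idx) => PySem.Str.slice s (some (idx - maxl)) (some idx)

-- ===== PRECONDITION & SPEC =====
def Spec_consecutive_substring1 (s : String) (out : String) : Prop := out = consecutive_substring1_alt s
instance (s : String) (out : String) : Decidable (Spec_consecutive_substring1 s out) := by unfold Spec_consecutive_substring1; infer_instance

-- ===== CLAIM (what is proved, stated in full; the proofs are below) =====
def Claim_equal_consecutive_substring1 : Prop := ∀ (s : String), Dom_consecutive_substring1 s → Spec_consecutive_substring1 s (consecutive_substring1 s)

-- ===== LEMMAS AND PROOFS =====

-- A's fold over indices, rewritten as a structural recursion on the remaining characters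
def pvLoopA (prev : Char) (i cur maxl idx : Int) : List Char → Int × Int × Int
  | [] => (cur, maxl, idx)
  | c :: rest =>
      if prev < c then pvLoopA c (i + 1) (cur + 1) maxl idx rest
      else if cur > maxl then pvLoopA c (i + 1) 1 cur i rest
      else pvLoopA c (i + 1) 1 maxl idx rest

def pvFinish (st : Int × Int × Int) (n : Int) : Int × Int :=
  match st with
  | (cur, maxl, idx) => if cur > maxl then (cur, n) else (maxl, idx)

theorem pv_bridgeA (rest : List Char) : ∀ (pre : List Char) (prev : Char) (st : Int × Int × Int),
    (PySem.List.pyRange ((pre.length : Int) + 1) ((pre.length : Int) + 1 + rest.length) 1).foldl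
        (pvStepA (pre ++ prev :: rest)) st
      = pvLoopA prev ((pre.length : Int) + 1) st.1 st.2.1 st.2.2 rest := by
  induction rest with
  | nil =>
    intro pre prev st
    simp [PySem.List.pyRange_one_eq_nil, pvLoopA]
  | cons c rest ih =>
    intro pre prev st
    obtain ⟨cur, maxl, idx⟩ := st
    rw [PySem.List.pyRange_one_cons (by simp only [List.length_cons]; push_cast; omega)]
    have h1 : PySem.List.pyGetD (pre ++ prev :: c :: rest) ((pre.length : Int) + 1) ' ' = c := by
      have : ((pre.length : Int) + 1) = ((pre.length + 1 : Nat) : Int) := by push_cast; ring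
      rw [this, PySem.List.pyGetD_natCast]
      simp [List.getD]
    have h0 : PySem.List.pyGetD (pre ++ prev :: c :: rest) ((pre.length : Int) + 1 - 1) ' ' = prev := by
      have : ((pre.length : Int) + 1 - 1) = ((pre.length : Nat) : Int) := by push_cast; ring
      rw [this, PySem.List.pyGetD_natCast]
      simp [List.getD]
    have key : ∀ st' : Int × Int × Int,
        (PySem.List.pyRange ((pre.length : Int) + 1 + 1) ((pre.length : Int) + 1 + (c :: rest).length) 1).foldl
            (pvStepA (pre ++ prev :: c :: rest)) st'
          = pvLoopA c ((pre.length : Int) + 1 + 1) st'.1 st'.2.1 st'.2.2 rest := by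
      intro st'
      have := ih (pre ++ [prev]) c st'
      simp only [List.append_assoc, List.cons_append, List.nil_append, List.length_append,
        List.length_cons, List.length_nil] at this ⊢
      have harg : ((pre.length + 1 : Nat) : Int) + 1 = (pre.length : Int) + 1 + 1 := by push_cast; ring
      rw [harg] at this
      convert this using 3 <;> push_cast <;> ring
    simp only [List.foldl_cons]
    rw [show (pvStepA (pre ++ prev :: c :: rest) (cur, maxl, idx) ((pre.length : Int) + 1))
        = (if prev < c then (cur + 1, maxl, idx)
           else if cur > maxl then (1, cur, (pre.length : Int) + 1) else (1, maxl, idx)) by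
      simp [pvStepA, h1]]
    by_cases hlt : prev < c
    · simp only [hlt, if_true]
      rw [key (cur + 1, maxl, idx)]
      simp [pvLoopA, hlt]
    · by_cases hcm : cur > maxl
      · simp only [hlt, if_false, hcm, if_true]
        rw [key (1, cur, (pre.length : Int) + 1)]
        simp [pvLoopA, hlt, hcm]
      · simp only [hlt, if_false, hcm]
        rw [key (1, maxl, idx)]
        simp [pvLoopA, hlt, hcm]

-- the main invariant: A's fused loop + end check  =  B's argmax over the run-length table
theorem pv_main (rest : List Char) : ∀ (prev : Char) (i cur maxl idx : Int),
    1 ≤ cur → 1 ≤ maxl →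
    pvFinish (pvLoopA prev i cur maxl idx rest) (i + rest.length)
      = (PySem.List.enumerate (pvBuildL (some prev) cur rest) i).foldl pvStepB
          (pvFinish (cur, maxl, idx) i) := by
  induction rest with
  | nil =>
    intro prev i cur maxl idx hc hm
    simp [pvLoopA, pvBuildL]
  | cons c rest ih =>
    intro prev i cur maxl idx hc hm
    rw [show pvBuildL (some prev) cur (c :: rest)
        = (if prev < c then cur + 1 else 1) :: pvBuildL (some c) (if prev < c then cur + 1 else 1) rest by
      simp [pvBuildL]]
    rw [PySem.List.enumerate_cons, List.foldl_cons]
    by_cases hlt : prev < c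
    · simp only [hlt, if_true]
      have step : pvStepB (pvFinish (cur, maxl, idx) i) (i, cur + 1)
          = pvFinish (cur + 1, maxl, idx) (i + 1) := by
        simp only [pvStepB, pvFinish]
        by_cases hcm : cur > maxl
        · simp [hcm]; omega
        · by_cases h2 : cur + 1 > maxl <;> simp [hcm, h2] <;> omega
      rw [step]
      have := ih c (i + 1) (cur + 1) maxl idx (by omega) hm
      rw [show i + ((c :: rest).length : Int) = (i + 1) + rest.length by simp; ring]
      simpa [pvLoopA, hlt] using this
    · simp only [hlt, if_false]
      have step : pvStepB (pvFinish (cur, maxl, idx) i) (i, 1) = pvFinish (cur, maxl, idx) i := by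
        simp only [pvStepB, pvFinish]
        by_cases hcm : cur > maxl <;> simp [hcm] <;> omega
      rw [step]
      by_cases hcm : cur > maxl
      · have := ih c (i + 1) 1 cur i le_rfl (by omega)
        rw [show i + ((c :: rest).length : Int) = (i + 1) + rest.length by simp; ring]
        rw [show pvLoopA prev i cur maxl idx (c :: rest) = pvLoopA c (i + 1) 1 cur i rest by
          simp [pvLoopA, hlt, hcm]]
        rw [this]
        congr 1
        simp only [pvFinish]
        have : ¬ ((1 : Int) > cur) := by omega
        simp [this, hcm]
      · have := ih c (i + 1) 1 maxl idx le_rfl hm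
        rw [show i + ((c :: rest).length : Int) = (i + 1) + rest.length by simp; ring]
        rw [show pvLoopA prev i cur maxl idx (c :: rest) = pvLoopA c (i + 1) 1 maxl idx rest by
          simp [pvLoopA, hlt, hcm]]
        rw [this]
        congr 1
        simp only [pvFinish]
        have h1 : ¬ ((1 : Int) > maxl) := by omega
        simp [h1, hcm]

-- ===== VERDICT (by name: the statement is the Claim_ definition above) =====
theorem consecutive_substring1_spec : Claim_equal_consecutive_substring1 := by
  intro s _
  unfold Spec_consecutive_substring1 consecutive_substring1 consecutive_substring1_alt
  cases hcs : s.toList with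
  | nil =>
    have h0 : s.length = 0 := by simpa using congrArg List.length hcs
    simp only [hcs, PySem.Str.len_eq, h0]
    rw [PySem.List.pyRange_one_eq_nil (by norm_num)]
    norm_num [pvBuildL]
  | cons c0 rest =>
    have hn : (PySem.Str.len s : Int) = 1 + rest.length := by
      simp [PySem.Str.len_eq, hcs]; ring
    have hA := pv_bridgeA rest [] c0 ((1 : Int), (1 : Int), (0 : Int))
    simp only [List.length_nil, Nat.cast_zero, zero_add, List.nil_append] at hA
    have hM := pv_main rest c0 1 1 1 0 le_rfl le_rfl
    norm_num [pvFinish] at hM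
    simp only [hcs]
    simp only [hn, hA]
    rw [show pvBuildL none 0 (c0 :: rest) = 1 :: pvBuildL (some c0) 1 rest by simp [pvBuildL]]
    rw [PySem.List.enumerate_cons, List.foldl_cons]
    rw [show pvStepB ((1 : Int), (0 : Int)) ((0 : Int), (1 : Int)) = (1, 0) by simp [pvStepB]]
    simp only [zero_add]
    rw [← hM]
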